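-- pv_equiv track=rewrite | github.com/erickdominguez/OtrodeMajalcalv | alnair.py | ascCol
-- ===== SOURCE A (Python) =====
-- def getHijos(edo,proble):
--     return proble[edo]
--
-- def siguiente(lista ,hs):
--     hmejor =1000
--     mejor= ''
--     for edo in lista:
--         if hs[edo]<hmejor:
--             hmejor=hs[edo]
--             mejor=edo
--     return mejor,hmejor
--
-- def ascCol(edo,hedo,proble,hs):
--     hijos=getHijos(edo,proble)
--     nuevo ,hnuevo=siguiente(hijos ,hs)
--     if hnuevo >hedo:
--         soln=edo
--     else:
--         soln=ascCol(nuevo ,hnuevo ,proble ,hs)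
--     return soln
-- ===== SOURCE B (Python) =====
-- def ascCol(edo, hedo, proble, hs):
--     while True:
--         hijos = proble[edo]
--         if not hijos:
--             return edo
--         nuevo = min(hijos, key=lambda c: hs[c])
--         hnuevo = hs[nuevo]
--         if hnuevo > hedo:
--             return edo
--         edo, hedo = nuevo, hnuevo
-- ===== Notes on version B (the rewrite author's own statement) =====
-- stated objective: simpler
-- what changed: tail recursion through a hand-rolled sentinel-1000 minimum helper is replaced by one explicit while-loop that early-returns on an empty child list and picks the best child with min(key=...)
-- outside the precondition, e.g. on ascCol('a', 9, {'a': ['b'], 'b': [], 'z': ['q']}, {'a': 1, 'b': 5}): A returns 'b', B returns 'b'; on ascCol('a', 2000, {'a': ['b'], 'b': []}, {'a': 1, 'b': 5}): A returns 'b', B returns 'b'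
import Mathlib
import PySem

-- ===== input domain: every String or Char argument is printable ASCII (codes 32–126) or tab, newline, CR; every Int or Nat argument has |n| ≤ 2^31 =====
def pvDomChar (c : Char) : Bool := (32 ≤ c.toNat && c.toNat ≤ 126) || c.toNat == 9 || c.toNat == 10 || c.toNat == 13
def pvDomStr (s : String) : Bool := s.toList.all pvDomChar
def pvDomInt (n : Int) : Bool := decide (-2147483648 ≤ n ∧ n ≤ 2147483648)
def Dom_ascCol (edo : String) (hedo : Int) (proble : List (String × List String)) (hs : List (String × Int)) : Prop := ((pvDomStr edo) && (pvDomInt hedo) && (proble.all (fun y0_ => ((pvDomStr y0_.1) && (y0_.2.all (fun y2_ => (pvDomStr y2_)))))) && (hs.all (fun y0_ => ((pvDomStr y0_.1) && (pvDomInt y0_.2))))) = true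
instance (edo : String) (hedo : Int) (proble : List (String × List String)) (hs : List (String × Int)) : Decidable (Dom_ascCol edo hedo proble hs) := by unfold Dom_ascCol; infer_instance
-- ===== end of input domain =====

-- B rewrites the tail recursion as one explicit while-loop with min(key=...) and an
-- empty-children early return, dropping the sentinel-1000 helper; same descent, same result.

-- ===== PORT A =====
-- getHijos(edo, proble): proble[edo]; the missing-key KeyError is excluded by Pre_, so the [] default is never used there
def getHijosL (edo : String) (proble : PySem.Dict String (List String)) : List String :=
  PySem.Dict.getD proble edo []

-- siguiente(lista, hs): running strict minimum with sentinel hmejor=1000, mejor=''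
def siguienteL (lista : List String) (hs : PySem.Dict String Int) : String × Int :=
  lista.foldl
    (fun acc edo => if PySem.Dict.getD hs edo 0 < acc.2 then (edo, PySem.Dict.getD hs edo 0) else acc)
    ("", 1000)

-- the recursion of A, with fuel (the Python recursion is partial; Pre_ guarantees the fuel suffices)
def ascColF : Nat → String → Int → PySem.Dict String (List String) → PySem.Dict String Int → String
  | 0, edo, _, _, _ => edo
  | fuel + 1, edo, hedo, proble, hs =>
    let hijos := getHijosL edo proble
    let p := siguienteL hijos hs
    if p.2 > hedo then edo
    else ascColF fuel p.1 p.2 proble hs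

def ascCol (edo : String) (hedo : Int) (proble : List (String × List String)) (hs : List (String × Int)) : String :=
  ascColF (hs.length + 2) edo hedo (PySem.Dict.mk proble) (PySem.Dict.mk hs)

-- ===== PORT B =====
-- the while-True loop of B, with the same fuel as A's recursion
def ascColLoop : Nat → String → Int → PySem.Dict String (List String) → PySem.Dict String Int → String
  | 0, edo, _, _, _ => edo
  | fuel + 1, edo, hedo, proble, hs =>
    let hijos := PySem.Dict.getD proble edo []
    if hijos.isEmpty then edo
    else
      let nuevo := (PySem.List.min? hijos (fun c => PySem.Dict.getD hs c 0)).getD ""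
      let hnuevo := PySem.Dict.getD hs nuevo 0
      if hnuevo > hedo then edo
      else ascColLoop fuel nuevo hnuevo proble hs

def ascCol_alt (edo : String) (hedo : Int) (proble : List (String × List String)) (hs : List (String × Int)) : String :=
  ascColLoop (hs.length + 2) edo hedo (PySem.Dict.mk proble) (PySem.Dict.mk hs)

-- ===== PRECONDITION & SPEC =====
-- Pre_ is a closed-form sufficient condition for the Python A to return: the start state is a key
-- of proble with all its children in hs, hedo is below the 1000 sentinel, and either every child's
-- heuristic already exceeds hedo (the descent stops at once), or the whole space is well formed —
-- every child anywhere is a key of both proble and hs (else KeyError) and no child shares its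
-- hs-value with its parent's (else the descent can revisit a state and A dies with RecursionError).
def Pre_ascCol (edo : String) (hedo : Int) (proble : List (String × List String)) (hs : List (String × Int)) : Prop :=
  hedo < 1000 ∧
  (PySem.Dict.mk proble).contains edo = true ∧
  (∀ c ∈ (PySem.Dict.mk proble).getD edo [], (PySem.Dict.mk hs).contains c = true) ∧
  ((∀ c ∈ (PySem.Dict.mk proble).getD edo [], (PySem.Dict.mk hs).getD c 0 > hedo) ∨
   ∀ p ∈ proble, ∀ c ∈ p.2,
     (PySem.Dict.mk proble).contains c = true ∧
     (PySem.Dict.mk hs).contains c = true ∧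
     (PySem.Dict.mk hs).get? c ≠ (PySem.Dict.mk hs).get? p.1)

instance (edo : String) (hedo : Int) (proble : List (String × List String)) (hs : List (String × Int)) : Decidable (Pre_ascCol edo hedo proble hs) := by unfold Pre_ascCol; infer_instance

def pvWitness_ascCol : String × Int × (List (String × List String)) × (List (String × Int)) :=
  ("A", 10, [("A", ["B"]), ("B", [])], [("A", 5), ("B", 3)])

def Spec_ascCol (edo : String) (hedo : Int) (proble : List (String × List String)) (hs : List (String × Int)) (out : String) : Prop := out = ascCol_alt edo hedo proble hs
instance (edo : String) (hedo : Int) (proble : List (String × List String)) (hs : List (String × Int)) (out : String) : Decidable (Spec_ascCol edo hedo proble hs out) := by unfold Spec_ascCol; infer_instance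

-- ===== CLAIM (what is proved, stated in full; the proofs are below) =====
def Claim_equal_ascCol : Prop := ∀ (edo : String) (hedo : Int) (proble : List (String × List String)) (hs : List (String × Int)), Dom_ascCol edo hedo proble hs → Pre_ascCol edo hedo proble hs → Spec_ascCol edo hedo proble hs (ascCol edo hedo proble hs)

-- ===== LEMMAS AND PROOFS =====

-- a contained key is found together with its item
theorem pvContains_get {ν : Type} (d : PySem.Dict String ν) (k : String)
    (h : d.contains k = true) : ∃ v, d.get? k = some v ∧ (k, v) ∈ d.items := by
  have hs : ∃ x ∈ d.items, (x.1 == k) = true := by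
    simpa [PySem.Dict.contains, List.any_eq_true] using h
  obtain ⟨pr, hfind⟩ := Option.isSome_iff_exists.mp (List.find?_isSome.mpr hs)
  have hk : pr.1 = k := by
    have := List.find?_some hfind
    exact eq_of_beq this
  refine ⟨pr.2, ?_, ?_⟩
  · simp [PySem.Dict.get?, hfind]
  · have := List.mem_of_find?_eq_some hfind
    simpa [← hk] using this

-- relation between A's sentinel fold and B's min?-fold, with generalized accumulators
def pvRel (f : String → Int) (o : Option String) (acc : String × Int) : Prop :=
  (o = none → acc = ("", 1000)) ∧
  ∀ m, o = some m → (f m < 1000 → acc = (m, f m)) ∧ (1000 ≤ f m → acc = ("", 1000))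

theorem pvRel_fold (hs : PySem.Dict String Int) :
    ∀ (lista : List String) (o : Option String) (acc : String × Int),
    pvRel (fun c => PySem.Dict.getD hs c 0) o acc →
    pvRel (fun c => PySem.Dict.getD hs c 0)
      (lista.foldl (fun acc x =>
        match acc with
        | none => some x
        | some m => if PySem.Dict.getD hs x 0 < PySem.Dict.getD hs m 0 then some x else some m) o)
      (lista.foldl (fun acc edo =>
        if PySem.Dict.getD hs edo 0 < acc.2 then (edo, PySem.Dict.getD hs edo 0) else acc) acc) := by
  intro lista
  induction lista with
  | nil => intro o acc h; simpa using h
  | cons x t ih =>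
    intro o acc h
    simp only [List.foldl_cons]
    apply ih
    obtain ⟨hnone, hsome⟩ := h
    cases o with
    | none =>
      have hacc : acc = ("", 1000) := hnone rfl
      subst hacc
      constructor
      · intro hc; cases hc
      · intro m hm
        obtain rfl : x = m := Option.some.inj hm
        constructor
        · intro hlt; simp [hlt]
        · intro hge; have hx : ¬ PySem.Dict.getD hs x 0 < 1000 := not_lt.mpr hge; simp [hx]
    | some m =>
      obtain ⟨h1, h2⟩ := hsome m rfl
      by_cases hx : PySem.Dict.getD hs x 0 < PySem.Dict.getD hs m 0
      · simp only [hx, if_true]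
        constructor
        · intro hc; cases hc
        · intro m' hm'
          obtain rfl : x = m' := Option.some.inj hm'
          constructor
          · intro hlt'
            by_cases hm1000 : PySem.Dict.getD hs m 0 < 1000
            · rw [h1 hm1000]; simp [hx]
            · rw [h2 (not_lt.mp hm1000)]; simp [hlt']
          · intro hge'
            have hm1000 : ¬ PySem.Dict.getD hs m 0 < 1000 := by
              intro hc; exact absurd (lt_trans hx hc) (not_lt.mpr hge')
            rw [h2 (not_lt.mp hm1000)]
            have hxlt : ¬ PySem.Dict.getD hs x 0 < 1000 := not_lt.mpr hge'
            simp [hxlt]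
      · simp only [hx, if_false]
        constructor
        · intro hc; cases hc
        · intro m' hm'
          obtain rfl : m = m' := Option.some.inj hm'
          constructor
          · intro hlt'
            rw [h1 hlt']
            simp [hx]
          · intro hge'
            rw [h2 hge']
            have hxlt : ¬ PySem.Dict.getD hs x 0 < 1000 := by
              intro hc; exact absurd (lt_of_lt_of_le hc hge') hx
            simp [hxlt]

-- characterisation of siguiente through B's min?
theorem pvSiguiente_char (hs : PySem.Dict String Int) (lista : List String) (m : String)
    (hmin : PySem.List.min? lista (fun c => PySem.Dict.getD hs c 0) = some m) :
    (PySem.Dict.getD hs m 0 < 1000 → siguienteL lista hs = (m, PySem.Dict.getD hs m 0)) ∧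
    (1000 ≤ PySem.Dict.getD hs m 0 → siguienteL lista hs = ("", 1000)) := by
  have h0 : pvRel (fun c => PySem.Dict.getD hs c 0) none ("", 1000) := by
    constructor
    · intro _; rfl
    · intro m hm; cases hm
  have hrel := pvRel_fold hs lista none ("", 1000) h0
  have hfold : lista.foldl (fun acc x =>
        match acc with
        | none => some x
        | some m => if PySem.Dict.getD hs x 0 < PySem.Dict.getD hs m 0 then some x else some m)
        (none : Option String) = some m := by
    rw [← hmin]
    unfold PySem.List.min?
    apply List.foldl_ext
    intro a b _
    cases a <;> rfl
  rw [hfold] at hrel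
  exact hrel.2 m rfl

-- the two fueled loops agree step by step under the well-formedness invariant
theorem pvLoop_eq (dp : PySem.Dict String (List String)) (dh : PySem.Dict String Int)
    (H : ∀ p ∈ dp.items, ∀ c ∈ p.2, dp.contains c = true) :
    ∀ (fuel : Nat) (edo : String) (hedo : Int), hedo < 1000 → dp.contains edo = true →
    ascColF fuel edo hedo dp dh = ascColLoop fuel edo hedo dp dh := by
  intro fuel
  induction fuel with
  | zero => intro edo hedo _ _; rfl
  | succ n ih =>
    intro edo hedo hlt hcon
    obtain ⟨cs, hget, hmem⟩ := pvContains_get dp edo hcon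
    have hijos_eq : PySem.Dict.getD dp edo [] = cs := by
      simp [PySem.Dict.getD, hget]
    show (let hijos := getHijosL edo dp
          let p := siguienteL hijos dh
          if p.2 > hedo then edo else ascColF n p.1 p.2 dp dh) =
         (let hijos := PySem.Dict.getD dp edo []
          if hijos.isEmpty then edo
          else
            let nuevo := (PySem.List.min? hijos (fun c => PySem.Dict.getD dh c 0)).getD ""
            let hnuevo := PySem.Dict.getD dh nuevo 0
            if hnuevo > hedo then edo else ascColLoop n nuevo hnuevo dp dh)
    simp only [getHijosL, hijos_eq]
    cases cs with
    | nil =>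
      have : siguienteL [] dh = ("", 1000) := rfl
      simp [this]
      omega
    | cons x t =>
      have hne : (x :: t) ≠ ([] : List String) := by simp
      obtain ⟨m, hmin⟩ := Option.isSome_iff_exists.mp (by
        rw [Option.isSome_iff_ne_none]
        intro hc
        exact hne ((PySem.List.min?_eq_none_iff (x :: t) (fun c => PySem.Dict.getD dh c 0)).mp hc))
      obtain ⟨hsml, hbig⟩ := pvSiguiente_char dh (x :: t) m hmin
      have hm_mem : m ∈ (x :: t) := PySem.List.min?_mem hmin
      simp only [List.isEmpty_cons, Bool.false_eq_true, if_false, hmin, Option.getD_some]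
      by_cases h1000 : PySem.Dict.getD dh m 0 < 1000
      · rw [hsml h1000]
        by_cases hgt : PySem.Dict.getD dh m 0 > hedo
        · simp [hgt]
        · simp only [hgt, if_false]
          exact ih m (PySem.Dict.getD dh m 0) h1000 (H (edo, x :: t) hmem m hm_mem)
      · rw [hbig (not_lt.mp h1000)]
        have hA : (1000 : Int) > hedo := hlt
        have hB : PySem.Dict.getD dh m 0 > hedo := lt_of_lt_of_le hlt (not_lt.mp h1000)
        simp [hA, hB]

-- when every child's heuristic already beats hedo, both sides stop at once and return edo
theorem pvStop (dp : PySem.Dict String (List String)) (dh : PySem.Dict String Int)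
    (edo : String) (hedo : Int) (fuel : Nat) (hlt : hedo < 1000)
    (hstop : ∀ c ∈ dp.getD edo [], PySem.Dict.getD dh c 0 > hedo) :
    ascColF (fuel + 1) edo hedo dp dh = edo ∧ ascColLoop (fuel + 1) edo hedo dp dh = edo := by
  show (let hijos := getHijosL edo dp
        let p := siguienteL hijos dh
        if p.2 > hedo then edo else ascColF fuel p.1 p.2 dp dh) = edo ∧
       (let hijos := PySem.Dict.getD dp edo []
        if hijos.isEmpty then edo
        else
          let nuevo := (PySem.List.min? hijos (fun c => PySem.Dict.getD dh c 0)).getD ""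
          let hnuevo := PySem.Dict.getD dh nuevo 0
          if hnuevo > hedo then edo else ascColLoop fuel nuevo hnuevo dp dh)  = edo
  simp only [getHijosL]
  cases hcs : PySem.Dict.getD dp edo [] with
  | nil =>
    have hA : siguienteL [] dh = ("", 1000) := rfl
    constructor
    · simp [hA]; omega
    · simp
  | cons x t =>
    have hne : (x :: t) ≠ ([] : List String) := by simp
    obtain ⟨m, hmin⟩ := Option.isSome_iff_exists.mp (by
      rw [Option.isSome_iff_ne_none]
      intro hc
      exact hne ((PySem.List.min?_eq_none_iff (x :: t) (fun c => PySem.Dict.getD dh c 0)).mp hc))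
    obtain ⟨hsml, hbig⟩ := pvSiguiente_char dh (x :: t) m hmin
    have hm_mem : m ∈ (x :: t) := PySem.List.min?_mem hmin
    have hmgt : PySem.Dict.getD dh m 0 > hedo := hstop m (by rw [hcs]; exact hm_mem)
    constructor
    · by_cases h1000 : PySem.Dict.getD dh m 0 < 1000
      · rw [hsml h1000]; simp [hmgt]
      · rw [hbig (not_lt.mp h1000)]
        have : (1000 : Int) > hedo := hlt
        simp [this]
    · simp [hmin, hmgt]

-- ===== VERDICT (by name: the statement is the Claim_ definition above) =====
theorem ascCol_spec : Claim_equal_ascCol := by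
  intro edo hedo proble hs _ hpre
  obtain ⟨hlt, hcon, _, hall | hall⟩ := hpre
  · show ascCol edo hedo proble hs = ascCol_alt edo hedo proble hs
    unfold ascCol ascCol_alt
    obtain ⟨hA, hB⟩ := pvStop (PySem.Dict.mk proble) (PySem.Dict.mk hs) edo hedo
      (hs.length + 1) hlt hall
    rw [hA, hB]
  · show ascCol edo hedo proble hs = ascCol_alt edo hedo proble hs
    unfold ascCol ascCol_alt
    apply pvLoop_eq
    · intro p hp c hc
      exact (hall p hp c hc).1
    · exact hlt
    · exact hcon
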